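-- pv_equiv track=rewrite | github.com/fabiuuh12/Physics-and-Programming | Aerospace/AstroPhysics/mathematics/equation_solver_animation.py | match_tokens
-- ===== SOURCE A (Python) =====
-- def match_tokens(old_tokens: list[str], new_tokens: list[str]) -> tuple[dict[int, int], set[int], set[int]]:
--     matches: dict[int, int] = {}
--     used_new: set[int] = set()
--     for i, old in enumerate(old_tokens):
--         for j, new in enumerate(new_tokens):
--             if j in used_new:
--                 continue
--             if old == new:
--                 matches[i] = j
--                 used_new.add(j)
--                 break
--     old_only = {i for i in range(len(old_tokens)) if i not in matches}
--     new_only = {j for j in range(len(new_tokens)) if j not in used_new}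
--     return matches, old_only, new_only
-- ===== SOURCE B (Python) =====
-- def match_tokens(old_tokens: list[str], new_tokens: list[str]) -> tuple[dict[int, int], set[int], set[int]]:
--     # Index new_tokens once: value -> queue of its indices, consumed front-to-back.
--     queues: dict[str, list[int]] = {}
--     for j, tok in enumerate(new_tokens):
--         queues.setdefault(tok, []).append(j)
--     nexts = {tok: iter(js) for tok, js in queues.items()}
--     matches: dict[int, int] = {}
--     for i, old in enumerate(old_tokens):
--         it = nexts.get(old)
--         if it is not None:
--             j = next(it, None)
--             if j is not None:
--                 matches[i] = j
--     used_new = set(matches.values())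
--     old_only = {i for i in range(len(old_tokens)) if i not in matches}
--     new_only = {j for j in range(len(new_tokens)) if j not in used_new}
--     return matches, old_only, new_only
-- ===== Notes on version B (the rewrite author's own statement) =====
-- stated objective: faster
-- what changed: Replaces the inner linear scan of new_tokens per old token with a one-pass index (value -> queue of new indices) consumed front-to-front, so each old token matches in O(1).
import Mathlib
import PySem

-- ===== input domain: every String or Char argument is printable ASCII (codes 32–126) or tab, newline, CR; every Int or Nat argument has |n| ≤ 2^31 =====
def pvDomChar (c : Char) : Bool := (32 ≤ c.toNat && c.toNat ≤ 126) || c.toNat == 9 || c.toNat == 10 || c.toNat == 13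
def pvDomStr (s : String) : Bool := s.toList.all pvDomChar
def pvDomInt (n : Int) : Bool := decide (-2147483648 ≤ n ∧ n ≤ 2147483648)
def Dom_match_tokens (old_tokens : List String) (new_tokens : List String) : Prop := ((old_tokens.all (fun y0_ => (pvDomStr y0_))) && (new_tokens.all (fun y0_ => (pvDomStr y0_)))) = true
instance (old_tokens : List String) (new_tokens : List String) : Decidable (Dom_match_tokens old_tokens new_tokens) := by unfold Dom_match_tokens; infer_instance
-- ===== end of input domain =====

-- B replaces A's inner linear scan of new_tokens per old token by a value → queue-of-indices
-- map built once and consumed from the front (objective: faster).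


-- ===== PORT A =====
-- inner 'for j, new in enumerate(new_tokens): if j in used_new: continue; if old == new: … break'
def aFind (old : String) (used : PySem.Set Int) : List (Int × String) → Option Int
  | [] => none
  | (j, new) :: rest =>
    if PySem.Set.contains used j then aFind old used rest
    else if old == new then some j
    else aFind old used rest

def aStep (new_tokens : List String) (st : PySem.Dict Int Int × PySem.Set Int) (p : Int × String) :
    PySem.Dict Int Int × PySem.Set Int :=
  match aFind p.2 st.2 (PySem.List.enumerate new_tokens) with
  | some j => (st.1.insert p.1 j, PySem.Set.add st.2 j)
  | none => st

def match_tokens (old_tokens : List String) (new_tokens : List String) : (List (Int × Int)) × List Int × List Int :=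
  let st := (PySem.List.enumerate old_tokens).foldl (aStep new_tokens) (PySem.Dict.empty, PySem.Set.empty)
  let matchesD := st.1
  let used_new := st.2
  let old_only := PySem.Set.ofList ((PySem.List.pyRange 0 (old_tokens.length : Int) 1).filter (fun i => !(matchesD.contains i)))
  let new_only := PySem.Set.ofList ((PySem.List.pyRange 0 (new_tokens.length : Int) 1).filter (fun j => !(PySem.Set.contains used_new j)))
  (matchesD.items, old_only, new_only)

-- ===== PORT B =====
-- 'it = nexts.get(old); if it is not None: j = next(it, None); if j is not None: matchesD[i] = j'
-- (an iterator over a list of indices is modelled by the list of its not-yet-consumed elements)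
def bStep (st : PySem.Dict Int Int × PySem.Dict String (List Int)) (p : Int × String) :
    PySem.Dict Int Int × PySem.Dict String (List Int) :=
  match st.2.get? p.2 with
  | some (j :: rest) => (st.1.insert p.1 j, st.2.insert p.2 rest)
  | some [] => st
  | none => st

def match_tokens_alt (old_tokens : List String) (new_tokens : List String) : (List (Int × Int)) × List Int × List Int :=
  -- 'queues.setdefault(tok, []).append(j)'  =  d[tok] = d.get(tok, []) + [j]
  let queues : PySem.Dict String (List Int) :=
    (PySem.List.enumerate new_tokens).foldl (fun d p => d.modify p.2 [] (· ++ [p.1])) PySem.Dict.empty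
  -- 'nexts = {tok: iter(js) for tok, js in queues.items()}': iter(js) is modelled by js itself
  let nexts := queues
  let st := (PySem.List.enumerate old_tokens).foldl bStep (PySem.Dict.empty, nexts)
  let matchesD := st.1
  let used_new := PySem.Set.ofList matchesD.values
  let old_only := PySem.Set.ofList ((PySem.List.pyRange 0 (old_tokens.length : Int) 1).filter (fun i => !(matchesD.contains i)))
  let new_only := PySem.Set.ofList ((PySem.List.pyRange 0 (new_tokens.length : Int) 1).filter (fun j => !(PySem.Set.contains used_new j)))
  (matchesD.items, old_only, new_only)

-- ===== PRECONDITION & SPEC =====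
def Spec_match_tokens (old_tokens : List String) (new_tokens : List String) (out : (List (Int × Int)) × List Int × List Int) : Prop := out = match_tokens_alt old_tokens new_tokens
instance (old_tokens : List String) (new_tokens : List String) (out : (List (Int × Int)) × List Int × List Int) : Decidable (Spec_match_tokens old_tokens new_tokens out) := by unfold Spec_match_tokens; infer_instance

-- ===== CLAIM (what is proved, stated in full; the proofs are below) =====
def Claim_equal_match_tokens : Prop := ∀ (old_tokens : List String) (new_tokens : List String), Dom_match_tokens old_tokens new_tokens → Spec_match_tokens old_tokens new_tokens (match_tokens old_tokens new_tokens)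

-- ===== LEMMAS AND PROOFS =====

-- indices of the occurrences of v in new_tokens, in order
def occIdx (new_tokens : List String) (v : String) : List Int :=
  ((PySem.List.enumerate new_tokens).filter (fun p => p.2 == v)).map (·.1)

-- the occurrences of v not yet used, in order
def unusedOcc (new_tokens : List String) (used : PySem.Set Int) (v : String) : List Int :=
  (occIdx new_tokens v).filter (fun j => !(PySem.Set.contains used j))

lemma aFind_eq_gen (v : String) (used : PySem.Set Int) (l : List (Int × String)) :
    aFind v used l
      = (((l.filter (fun p => p.2 == v)).map (·.1)).filter (fun j => !(PySem.Set.contains used j))).head? := by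
  induction l with
  | nil => rfl
  | cons p l ih =>
    obtain ⟨j, t⟩ := p
    by_cases ht : t = v
    · subst ht
      by_cases hu : j ∈ used
      · simp [aFind, PySem.Set.contains, hu, ih]
      · simp [aFind, PySem.Set.contains, hu]
    · have hvt : (v == t) = false := by simp [Ne.symm ht]
      have htv : (t == v) = false := by simp [ht]
      by_cases hu : j ∈ used
      · simp [aFind, PySem.Set.contains, hu, hvt, htv, ih]
      · simp [aFind, PySem.Set.contains, hu, hvt, htv, ih]

lemma aFind_eq (v : String) (used : PySem.Set Int) (new_tokens : List String) :
    aFind v used (PySem.List.enumerate new_tokens) = (unusedOcc new_tokens used v).head? := by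
  rw [aFind_eq_gen]; rfl

lemma nodup_fst_enumerate (xs : List String) (s : Int) :
    ((PySem.List.enumerate xs s).map Prod.fst).Nodup := by
  refine List.Pairwise.imp ne_of_lt ?_
  exact List.pairwise_map.mpr (PySem.List.pairwise_lt_enumerate xs s)

lemma occIdx_nodup (nt : List String) (v : String) : (occIdx nt v).Nodup := by
  unfold occIdx
  refine List.Pairwise.imp ne_of_lt ?_
  exact List.pairwise_map.mpr ((PySem.List.pairwise_lt_enumerate nt 0).filter _)

lemma occIdx_disjoint {nt : List String} {v v' : String} {j : Int}
    (h : j ∈ occIdx nt v) (h' : j ∈ occIdx nt v') : v = v' := by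
  unfold occIdx at h h'
  obtain ⟨p, hp, hpj⟩ := List.mem_map.mp h
  obtain ⟨p', hp', hpj'⟩ := List.mem_map.mp h'
  obtain ⟨hpe, hpv⟩ := List.mem_filter.mp hp
  obtain ⟨hpe', hpv'⟩ := List.mem_filter.mp hp'
  obtain ⟨k, hk, rfl⟩ := (PySem.List.mem_enumerate_iff _ _ _).mp hpe
  obtain ⟨k', hk', rfl⟩ := (PySem.List.mem_enumerate_iff _ _ _).mp hpe'
  simp only at hpj hpj' hpv hpv'
  have : k = k' := by omega
  subst this
  rw [← (beq_iff_eq).mp hpv, ← (beq_iff_eq).mp hpv']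

lemma getD_build (l : List (Int × String)) (d : PySem.Dict String (List Int)) (v : String) :
    (l.foldl (fun d p => d.modify p.2 [] (· ++ [p.1])) d).getD v []
      = d.getD v [] ++ (l.filter (fun p => p.2 == v)).map (·.1) := by
  induction l generalizing d with
  | nil => simp
  | cons p l ih =>
    simp only [List.foldl_cons, ih]
    by_cases h : p.2 = v
    · simp [PySem.Dict.getD_modify, h]
    · simp [PySem.Dict.getD_modify, h, Ne.symm h]

lemma contains_add_eq (s : PySem.Set Int) (j x : Int) :
    PySem.Set.contains (PySem.Set.add s j) x = (PySem.Set.contains s x || x == j) := by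
  unfold PySem.Set.add
  split_ifs with h
  · by_cases hx : x = j
    · subst hx; simp [PySem.Set.contains] at h ⊢; exact h
    · simp [hx]
  · by_cases hx : x = j
    · subst hx; simp [PySem.Set.contains]
    · simp [PySem.Set.contains, hx]

lemma values_insert_fresh (m : PySem.Dict Int Int) (k j : Int) (h : m.contains k = false) :
    (m.insert k j).values = m.values ++ [j] := by
  simp [PySem.Dict.values, PySem.Dict.items_insert, h]

lemma ofList_append_singleton (l : List Int) (j : Int) :
    PySem.Set.ofList (l ++ [j]) = PySem.Set.add (PySem.Set.ofList l) j := by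
  simp [PySem.Set.ofList_eq_foldl, List.foldl_append]

lemma unusedOcc_add (nt : List String) (used : PySem.Set Int) (j : Int) (v : String) :
    unusedOcc nt (PySem.Set.add used j) v = (unusedOcc nt used v).filter (fun x => !(x == j)) := by
  unfold unusedOcc
  rw [List.filter_filter]
  refine List.filter_congr ?_
  intro x _
  rw [contains_add_eq]
  cases PySem.Set.contains used x <;> cases hxj : x == j <;> rfl

lemma loop_eq (new_tokens : List String) (L : List (Int × String))
    (m : PySem.Dict Int Int) (used : PySem.Set Int) (nx : PySem.Dict String (List Int))
    (hfresh : ∀ p ∈ L, m.contains p.1 = false)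
    (hnd : (L.map Prod.fst).Nodup)
    (hused : used = PySem.Set.ofList m.values)
    (hInv : ∀ v, (nx.get? v).getD [] = unusedOcc new_tokens used v) :
    (L.foldl (aStep new_tokens) (m, used)).1 = (L.foldl bStep (m, nx)).1 ∧
    (L.foldl (aStep new_tokens) (m, used)).2 = PySem.Set.ofList (L.foldl bStep (m, nx)).1.values := by
  induction L generalizing m used nx with
  | nil => exact ⟨rfl, hused⟩
  | cons p L ih =>
    have hInvp := hInv p.2
    have hfind := aFind_eq p.2 used new_tokens
    have hnd' : (p.1 :: List.map Prod.fst L).Nodup := by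
      simpa only [List.map_cons] using hnd
    have hndc := List.nodup_cons.mp hnd' 
    simp only [List.foldl_cons]
    cases hq : nx.get? p.2 with
    | none =>
      have hemp : unusedOcc new_tokens used p.2 = [] := by rw [← hInvp, hq]; rfl
      have ha : aStep new_tokens (m, used) p = (m, used) := by
        simp [aStep, hfind, hemp]
      have hb : bStep (m, nx) p = (m, nx) := by simp [bStep, hq]
      rw [ha, hb]
      exact ih m used nx (fun q hqL => hfresh q (List.mem_cons_of_mem _ hqL)) hndc.2 hused hInv
    | some q =>
      cases q with
      | nil =>
        have hemp : unusedOcc new_tokens used p.2 = [] := by rw [← hInvp, hq]; rfl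
        have ha : aStep new_tokens (m, used) p = (m, used) := by
          simp [aStep, hfind, hemp]
        have hb : bStep (m, nx) p = (m, nx) := by simp [bStep, hq]
        rw [ha, hb]
        exact ih m used nx (fun q hqL => hfresh q (List.mem_cons_of_mem _ hqL)) hndc.2 hused hInv
      | cons j rest =>
        have hlist : unusedOcc new_tokens used p.2 = j :: rest := by rw [← hInvp, hq]; rfl
        have ha : aStep new_tokens (m, used) p = (m.insert p.1 j, PySem.Set.add used j) := by
          simp [aStep, hfind, hlist]
        have hb : bStep (m, nx) p = (m.insert p.1 j, nx.insert p.2 rest) := by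
          simp [bStep, hq]
        rw [ha, hb]
        have hfreshp : m.contains p.1 = false := hfresh p (List.mem_cons_self ..)
        have hjmemu : j ∈ unusedOcc new_tokens used p.2 := by
          rw [hlist]; exact List.mem_cons_self ..
        have hjocc : j ∈ occIdx new_tokens p.2 := List.mem_of_mem_filter hjmemu
        have hjrest : j ∉ rest := by
          have hnu : (unusedOcc new_tokens used p.2).Nodup := (occIdx_nodup _ _).filter _
          rw [hlist] at hnu
          exact (List.nodup_cons.mp hnu).1
        refine ih _ _ _ ?_ hndc.2 ?_ ?_
        · intro q hqL
          rw [PySem.Dict.contains_insert]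
          have hne : q.1 ≠ p.1 := by
            intro e
            exact hndc.1 (e ▸ List.mem_map_of_mem hqL)
          simp [hne, hfresh q (List.mem_cons_of_mem _ hqL)]
        · rw [values_insert_fresh m p.1 j hfreshp, ofList_append_singleton, hused]
        · intro v
          by_cases hv : v = p.2
          · subst hv
            rw [PySem.Dict.get?_insert_self]
            show rest = _
            rw [unusedOcc_add, hlist]
            have : ∀ x ∈ rest, (!(x == j)) = true := by
              intro x hx
              have hxne : x ≠ j := fun e => hjrest (e ▸ hx)
              simp [hxne]
            simp [List.filter_eq_self.mpr this]
          · rw [PySem.Dict.get?_insert_of_ne]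
            · rw [hInv v, unusedOcc_add]
              have : ∀ x ∈ unusedOcc new_tokens used v, (!(x == j)) = true := by
                intro x hx
                have hxocc : x ∈ occIdx new_tokens v := List.mem_of_mem_filter hx
                have : x ≠ j := fun e => hv (occIdx_disjoint (e ▸ hxocc) hjocc)
                simp [this]
              rw [List.filter_eq_self.mpr this]
            · exact hv

lemma main_eq (old_tokens new_tokens : List String) :
    match_tokens old_tokens new_tokens = match_tokens_alt old_tokens new_tokens := by
  have hfresh : ∀ p ∈ PySem.List.enumerate old_tokens,
      (PySem.Dict.empty : PySem.Dict Int Int).contains p.1 = false := by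
    intro p _; simp [pysem]
  have hnd := nodup_fst_enumerate old_tokens 0
  have hinv : ∀ v,
      (((PySem.List.enumerate new_tokens).foldl
          (fun d p => d.modify p.2 [] (· ++ [p.1])) PySem.Dict.empty).get? v).getD []
        = unusedOcc new_tokens PySem.Set.empty v := by
    intro v
    rw [← PySem.Dict.getD_eq_get?_getD, getD_build]
    simp [unusedOcc, occIdx, PySem.Set.empty, PySem.Set.contains]
  obtain ⟨h1, h2⟩ := loop_eq new_tokens (PySem.List.enumerate old_tokens)
    PySem.Dict.empty PySem.Set.empty _ hfresh hnd rfl hinv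
  simp only [match_tokens, match_tokens_alt]
  rw [h1, h2]

-- ===== VERDICT (by name: the statement is the Claim_ definition above) =====
theorem match_tokens_spec : Claim_equal_match_tokens := by
  intro old_tokens new_tokens _
  exact main_eq old_tokens new_tokens
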